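-- pv_equiv track=rewrite | github.com/whalecorpus/landunlock | backend/models/reforestation_utils.py | get_iso_subdivisions
-- ===== SOURCE A (Python) =====
-- def get_iso_subdivisions(address):
--     """
--     Get all ISO3166-2 subdivision codes from Nominatim address details.
--
--     Args:
--         address (dict): Address details from Nominatim
--
--     Returns:
--         list: List of tuples (level, iso_code) where:
--             - level (int): The administrative level (1-8)
--             - iso_code (str): The full ISO code (e.g., 'RU-MOW')
--     """
--     iso_subdivisions = []
--
--     # Find all ISO3166-2- keys in the address
--     for key in address.keys():
--         if key.startswith('ISO3166-2-lvl'):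
--             try:
--                 level = int(key.split('lvl')[1])
--                 iso_code = address[key]
--                 iso_subdivisions.append((level, iso_code))
--             except (ValueError, IndexError):
--                 continue
--
--     # Sort by level, prioritizing level 4 and then falling back to lower levels
--     # We want: 4, 3, 2, 1, 5, 6, 7, 8, etc.
--     iso_subdivisions.sort(key=lambda x: (x[0] != 4, x[0] != 3, x[0] != 2, x[0] != 1, x[0]))
--
--     return iso_subdivisions
-- ===== SOURCE B (Python) =====
-- def get_iso_subdivisions(address):
--     """
--     Get all ISO3166-2 subdivision codes from Nominatim address details.
--
--     Two-phase rewrite: collect the parsed (level, code) entries once, then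
--     assemble the result as the fixed-priority buckets 4, 3, 2, 1 followed by
--     the remaining entries stably sorted by level ascending.
--     """
--     entries = []
--     for key, code in address.items():
--         if key.startswith('ISO3166-2-lvl'):
--             try:
--                 entries.append((int(key.split('lvl')[1]), code))
--             except (ValueError, IndexError):
--                 continue
--     priority = [e for lvl in (4, 3, 2, 1) for e in entries if e[0] == lvl]
--     rest = sorted((e for e in entries if e[0] not in (4, 3, 2, 1)), key=lambda e: e[0])
--     return priority + rest
-- ===== Notes on version B (the rewrite author's own statement) =====
-- stated objective: simpler
-- what changed: Replaces A's single stable sort under an opaque 5-boolean-tuple key by an explicit two-phase assembly: fixed-priority buckets for levels 4, 3, 2, 1 (in input order) followed by the remaining entries stably sorted by level ascending.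
import Mathlib
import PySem

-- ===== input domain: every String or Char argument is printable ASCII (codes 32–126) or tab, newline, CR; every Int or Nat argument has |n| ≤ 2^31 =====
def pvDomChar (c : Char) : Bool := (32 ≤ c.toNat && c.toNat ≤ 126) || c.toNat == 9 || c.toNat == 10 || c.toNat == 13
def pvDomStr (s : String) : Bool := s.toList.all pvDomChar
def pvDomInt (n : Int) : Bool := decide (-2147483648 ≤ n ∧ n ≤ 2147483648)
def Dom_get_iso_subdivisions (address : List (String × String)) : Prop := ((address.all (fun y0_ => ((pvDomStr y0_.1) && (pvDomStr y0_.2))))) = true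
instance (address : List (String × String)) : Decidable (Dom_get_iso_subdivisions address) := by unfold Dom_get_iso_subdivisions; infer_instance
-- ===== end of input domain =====

-- B replaces A's opaque 5-boolean-tuple sort key by an explicit bucket-and-assemble
-- second phase (priority buckets 4,3,2,1, then the rest sorted by level ascending); objective: simpler.


-- ===== PORT A =====
-- A's sort key '(x[0] != 4, x[0] != 3, x[0] != 2, x[0] != 1, x[0])' — Python's tuple
-- comparison is lexicographic, modelled with Mathlib's ×ₗ (Bool: False < True).
def pvLexKey (x : Int × String) : Bool ×ₗ Bool ×ₗ Bool ×ₗ Bool ×ₗ Int :=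
  toLex (x.1 != 4, toLex (x.1 != 3, toLex (x.1 != 2, toLex (x.1 != 1, x.1))))

def get_iso_subdivisions (address : List (String × String)) : List (Int × String) :=
  -- for key in address.keys(): … address[key] …
  let iso_subdivisions := (address.map (fun kv => kv.1)).foldl (fun acc key =>
    if PySem.Str.startswith key "ISO3166-2-lvl" then
      match PySem.Str.split? key "lvl" with
      | none => acc            -- unreachable: the separator "lvl" is nonempty
      | some parts =>
        match PySem.List.pyGet? parts 1 with
        | none => acc          -- IndexError → continue
        | some part =>
          match PySem.Int.ofStr? part with
          | none => acc        -- ValueError → continue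
          | some level =>
            match (PySem.Dict.mk address).get? key with
            | none => acc      -- unreachable: key is drawn from address's keys
            | some iso_code => acc ++ [(level, iso_code)]
    else acc) []
  PySem.List.sorted iso_subdivisions pvLexKey false

-- ===== PORT B =====
def get_iso_subdivisions_alt (address : List (String × String)) : List (Int × String) :=
  let entries := address.foldl (fun acc kv =>
    if PySem.Str.startswith kv.1 "ISO3166-2-lvl" then
      match PySem.Str.split? kv.1 "lvl" with
      | none => acc
      | some parts =>
        match PySem.List.pyGet? parts 1 with
        | none => acc          -- IndexError → continue
        | some part =>
          match PySem.Int.ofStr? part with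
          | none => acc        -- ValueError → continue
          | some lvl => acc ++ [(lvl, kv.2)]
    else acc) []
  let priority := ([4, 3, 2, 1] : List Int).flatMap (fun lvl => entries.filter (fun e => e.1 == lvl))
  let rest := PySem.List.sorted
    (entries.filter (fun e => !(e.1 == 4 || e.1 == 3 || e.1 == 2 || e.1 == 1)))
    (fun e => e.1) false
  priority ++ rest

-- ===== PRECONDITION & SPEC =====
-- Pre_ excludes association lists with duplicate keys: the Python argument is a dict,
-- whose keys are distinct by construction, so such lists represent no dict input.
def Pre_get_iso_subdivisions (address : List (String × String)) : Prop :=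
  (address.map (fun kv => kv.1)).Nodup
instance (address : List (String × String)) : Decidable (Pre_get_iso_subdivisions address) := by unfold Pre_get_iso_subdivisions; infer_instance
def pvWitness_get_iso_subdivisions : (List (String × String)) :=
  [("ISO3166-2-lvl4", "RU-MOW"), ("ISO3166-2-lvl8", "RU-X"), ("country", "Russia")]

def Spec_get_iso_subdivisions (address : List (String × String)) (out : List (Int × String)) : Prop := out = get_iso_subdivisions_alt address
instance (address : List (String × String)) (out : List (Int × String)) : Decidable (Spec_get_iso_subdivisions address out) := by unfold Spec_get_iso_subdivisions; infer_instance

-- ===== CLAIM (what is proved, stated in full; the proofs are below) =====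
def Claim_equal_get_iso_subdivisions : Prop := ∀ (address : List (String × String)), Dom_get_iso_subdivisions address → Pre_get_iso_subdivisions address → Spec_get_iso_subdivisions address (get_iso_subdivisions address)

-- ===== LEMMAS AND PROOFS =====

-- The comparison A's stable sort uses, explicitly by bucket of the left level.
def pvBefore (x y : Int × String) : Bool := decide (pvLexKey x < pvLexKey y)

theorem pvBefore_4 (x y : Int × String) (hx : x.1 = 4) : pvBefore x y = (y.1 != 4) := by
  by_cases h : y.1 = 4 <;> simp [pvBefore, pvLexKey, Prod.Lex.lt_iff, Bool.lt_iff, hx, h]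

theorem pvBefore_3 (x y : Int × String) (hx : x.1 = 3) : pvBefore x y = (y.1 != 4 && y.1 != 3) := by
  by_cases h4 : y.1 = 4 <;> by_cases h3 : y.1 = 3 <;>
    simp [pvBefore, pvLexKey, Prod.Lex.lt_iff, Bool.lt_iff, hx, h4, h3]

theorem pvBefore_2 (x y : Int × String) (hx : x.1 = 2) :
    pvBefore x y = (y.1 != 4 && y.1 != 3 && y.1 != 2) := by
  by_cases h4 : y.1 = 4 <;> by_cases h3 : y.1 = 3 <;> by_cases h2 : y.1 = 2 <;>
    simp [pvBefore, pvLexKey, Prod.Lex.lt_iff, Bool.lt_iff, hx, h4, h3, h2]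

theorem pvBefore_1 (x y : Int × String) (hx : x.1 = 1) :
    pvBefore x y = (y.1 != 4 && y.1 != 3 && y.1 != 2 && y.1 != 1) := by
  by_cases h4 : y.1 = 4 <;> by_cases h3 : y.1 = 3 <;> by_cases h2 : y.1 = 2 <;> by_cases h1 : y.1 = 1 <;>
    simp [pvBefore, pvLexKey, Prod.Lex.lt_iff, Bool.lt_iff, hx, h4, h3, h2, h1]

theorem pvBefore_rest_prio (x y : Int × String)
    (hx : x.1 ≠ 4 ∧ x.1 ≠ 3 ∧ x.1 ≠ 2 ∧ x.1 ≠ 1)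
    (hy : y.1 = 4 ∨ y.1 = 3 ∨ y.1 = 2 ∨ y.1 = 1) : pvBefore x y = false := by
  obtain ⟨hx4, hx3, hx2, hx1⟩ := hx
  rcases hy with h | h | h | h <;>
    simp [pvBefore, pvLexKey, Prod.Lex.lt_iff, Bool.lt_iff, hx4, hx3, hx2, hx1, h]

theorem pvBefore_rest_rest (x y : Int × String)
    (hx : x.1 ≠ 4 ∧ x.1 ≠ 3 ∧ x.1 ≠ 2 ∧ x.1 ≠ 1)
    (hy : y.1 ≠ 4 ∧ y.1 ≠ 3 ∧ y.1 ≠ 2 ∧ y.1 ≠ 1) : pvBefore x y = decide (x.1 < y.1) := by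
  obtain ⟨hx4, hx3, hx2, hx1⟩ := hx
  obtain ⟨hy4, hy3, hy2, hy1⟩ := hy
  simp [pvBefore, pvLexKey, Prod.Lex.lt_iff, Bool.lt_iff, bne, hx4, hx3, hx2, hx1, hy4, hy3, hy2, hy1]

-- insertBy skips a prefix it is never inserted before
theorem pvInsertBy_append {α : Type} (before : α → α → Bool) (x : α) (as bs : List α)
    (h : ∀ a ∈ as, before x a = false) :
    PySem.List.insertBy before x (as ++ bs) = as ++ PySem.List.insertBy before x bs := by
  induction as with
  | nil => rfl
  | cons a as ih =>
    simp [PySem.List.insertBy, h a (by simp), ih (fun b hb => h b (by simp [hb]))]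

theorem pvInsertBy_congr {α : Type} (b₁ b₂ : α → α → Bool) (x : α) (ys : List α)
    (h : ∀ y ∈ ys, b₁ x y = b₂ x y) :
    PySem.List.insertBy b₁ x ys = PySem.List.insertBy b₂ x ys := by
  induction ys with
  | nil => rfl
  | cons y ys ih =>
    simp only [PySem.List.insertBy, h y (by simp)]
    split <;> simp_all

-- The assembled (bucketed) form of B's second phase, over an arbitrary entries list.
def pvAssemble (es : List (Int × String)) : List (Int × String) :=
  ([4, 3, 2, 1] : List Int).flatMap (fun lvl => es.filter (fun e => e.1 == lvl)) ++
    PySem.List.sorted (es.filter (fun e => !(e.1 == 4 || e.1 == 3 || e.1 == 2 || e.1 == 1)))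
      (fun e => e.1) false

theorem pvInsertBy_all {α : Type} (before : α → α → Bool) (x : α) (ys : List α)
    (h : ∀ y ∈ ys, before x y = true) :
    PySem.List.insertBy before x ys = x :: ys := by
  cases ys with
  | nil => rfl
  | cons y ys => simp [PySem.List.insertBy, h y (by simp)]

-- A's stable sort under the 5-tuple key IS the bucket assembly.
theorem pvSorted_eq_assemble (es : List (Int × String)) :
    PySem.List.sorted es pvLexKey false = pvAssemble es := by
  induction es using List.reverseRecOn with
  | nil => rfl
  | append_singleton ys x ih =>
    have step : PySem.List.sorted (ys ++ [x]) pvLexKey false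
        = PySem.List.insertBy pvBefore x (PySem.List.sorted ys pvLexKey false) := by
      rw [PySem.List.sorted_eq_foldl_insertBy, PySem.List.sorted_eq_foldl_insertBy,
        List.foldl_append]
      rfl
    rw [step, ih]
    simp only [pvAssemble, List.flatMap_cons, List.flatMap_nil, List.append_nil,
      List.append_assoc]
    -- abbreviations for the buckets of ys
    have hmem4 : ∀ a ∈ ys.filter (fun e => e.1 == (4 : Int)), a.1 = 4 := by
      intro a ha; simpa using (List.mem_filter.mp ha).2
    have hmem3 : ∀ a ∈ ys.filter (fun e => e.1 == (3 : Int)), a.1 = 3 := by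
      intro a ha; simpa using (List.mem_filter.mp ha).2
    have hmem2 : ∀ a ∈ ys.filter (fun e => e.1 == (2 : Int)), a.1 = 2 := by
      intro a ha; simpa using (List.mem_filter.mp ha).2
    have hmem1 : ∀ a ∈ ys.filter (fun e => e.1 == (1 : Int)), a.1 = 1 := by
      intro a ha; simpa using (List.mem_filter.mp ha).2
    have hmemR : ∀ a ∈ PySem.List.sorted
        (ys.filter (fun e => !(e.1 == (4:Int) || e.1 == 3 || e.1 == 2 || e.1 == 1)))
        (fun e => e.1) false, a.1 ≠ 4 ∧ a.1 ≠ 3 ∧ a.1 ≠ 2 ∧ a.1 ≠ 1 := by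
      intro a ha
      have := (List.mem_filter.mp ((PySem.List.mem_sorted _ _ _ _).mp ha)).2
      simp at this
      tauto
    by_cases h4 : x.1 = 4
    · -- x joins the level-4 bucket
      rw [pvInsertBy_append pvBefore x _ _
            (fun a ha => by rw [pvBefore_4 x a h4]; simp [hmem4 a ha]),
          pvInsertBy_all pvBefore x _
            (fun y hy => by
              rw [pvBefore_4 x y h4]
              rcases List.mem_append.mp hy with hy | hy
              · simp [hmem3 y hy]
              rcases List.mem_append.mp hy with hy | hy
              · simp [hmem2 y hy]
              rcases List.mem_append.mp hy with hy | hy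
              · simp [hmem1 y hy]
              · simp [(hmemR y hy).1])]
      simp [List.filter_append, h4]
    by_cases h3 : x.1 = 3
    · rw [show List.filter (fun e => e.1 == (4:Int)) ys ++
            (List.filter (fun e => e.1 == (3:Int)) ys ++
              (List.filter (fun e => e.1 == (2:Int)) ys ++
                (List.filter (fun e => e.1 == (1:Int)) ys ++
                  PySem.List.sorted
                    (List.filter (fun e => !(e.1 == (4:Int) || e.1 == 3 || e.1 == 2 || e.1 == 1)) ys)
                    (fun e => e.1) false))) =
            (List.filter (fun e => e.1 == (4:Int)) ys ++ List.filter (fun e => e.1 == (3:Int)) ys) ++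
              (List.filter (fun e => e.1 == (2:Int)) ys ++
                (List.filter (fun e => e.1 == (1:Int)) ys ++
                  PySem.List.sorted
                    (List.filter (fun e => !(e.1 == (4:Int) || e.1 == 3 || e.1 == 2 || e.1 == 1)) ys)
                    (fun e => e.1) false))
          by simp,
          pvInsertBy_append pvBefore x _ _
            (fun a ha => by
              rw [pvBefore_3 x a h3]
              rcases List.mem_append.mp ha with ha | ha
              · simp [hmem4 a ha]
              · simp [hmem3 a ha]),
          pvInsertBy_all pvBefore x _
            (fun y hy => by
              rw [pvBefore_3 x y h3]
              rcases List.mem_append.mp hy with hy | hy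
              · simp [hmem2 y hy]
              rcases List.mem_append.mp hy with hy | hy
              · simp [hmem1 y hy]
              · have := hmemR y hy
                simp [this.1, this.2.1])]
      simp [List.filter_append, h3]
    by_cases h2 : x.1 = 2
    · rw [show List.filter (fun e => e.1 == (4:Int)) ys ++
            (List.filter (fun e => e.1 == (3:Int)) ys ++
              (List.filter (fun e => e.1 == (2:Int)) ys ++
                (List.filter (fun e => e.1 == (1:Int)) ys ++
                  PySem.List.sorted
                    (List.filter (fun e => !(e.1 == (4:Int) || e.1 == 3 || e.1 == 2 || e.1 == 1)) ys)
                    (fun e => e.1) false))) =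
            (List.filter (fun e => e.1 == (4:Int)) ys ++
              (List.filter (fun e => e.1 == (3:Int)) ys ++ List.filter (fun e => e.1 == (2:Int)) ys)) ++
              (List.filter (fun e => e.1 == (1:Int)) ys ++
                PySem.List.sorted
                  (List.filter (fun e => !(e.1 == (4:Int) || e.1 == 3 || e.1 == 2 || e.1 == 1)) ys)
                  (fun e => e.1) false)
          by simp,
          pvInsertBy_append pvBefore x _ _
            (fun a ha => by
              rw [pvBefore_2 x a h2]
              rcases List.mem_append.mp ha with ha | ha
              · simp [hmem4 a ha]
              rcases List.mem_append.mp ha with ha | ha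
              · simp [hmem3 a ha]
              · simp [hmem2 a ha]),
          pvInsertBy_all pvBefore x _
            (fun y hy => by
              rw [pvBefore_2 x y h2]
              rcases List.mem_append.mp hy with hy | hy
              · simp [hmem1 y hy]
              · have := hmemR y hy
                simp [this.1, this.2.1, this.2.2.1])]
      simp [List.filter_append, h2]
    by_cases h1 : x.1 = 1
    · rw [show List.filter (fun e => e.1 == (4:Int)) ys ++
            (List.filter (fun e => e.1 == (3:Int)) ys ++
              (List.filter (fun e => e.1 == (2:Int)) ys ++
                (List.filter (fun e => e.1 == (1:Int)) ys ++
                  PySem.List.sorted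
                    (List.filter (fun e => !(e.1 == (4:Int) || e.1 == 3 || e.1 == 2 || e.1 == 1)) ys)
                    (fun e => e.1) false))) =
            (List.filter (fun e => e.1 == (4:Int)) ys ++
              (List.filter (fun e => e.1 == (3:Int)) ys ++
                (List.filter (fun e => e.1 == (2:Int)) ys ++ List.filter (fun e => e.1 == (1:Int)) ys))) ++
              PySem.List.sorted
                (List.filter (fun e => !(e.1 == (4:Int) || e.1 == 3 || e.1 == 2 || e.1 == 1)) ys)
                (fun e => e.1) false
          by simp,
          pvInsertBy_append pvBefore x _ _
            (fun a ha => by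
              rw [pvBefore_1 x a h1]
              rcases List.mem_append.mp ha with ha | ha
              · simp [hmem4 a ha]
              rcases List.mem_append.mp ha with ha | ha
              · simp [hmem3 a ha]
              rcases List.mem_append.mp ha with ha | ha
              · simp [hmem2 a ha]
              · simp [hmem1 a ha]),
          pvInsertBy_all pvBefore x _
            (fun y hy => by
              rw [pvBefore_1 x y h1]
              have := hmemR y hy
              simp [this.1, this.2.1, this.2.2.1, this.2.2.2])]
      simp [List.filter_append, h1]
    · -- x belongs to the rest: skip all four priority buckets, insert by level
      rw [show List.filter (fun e => e.1 == (4:Int)) ys ++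
            (List.filter (fun e => e.1 == (3:Int)) ys ++
              (List.filter (fun e => e.1 == (2:Int)) ys ++
                (List.filter (fun e => e.1 == (1:Int)) ys ++
                  PySem.List.sorted
                    (List.filter (fun e => !(e.1 == (4:Int) || e.1 == 3 || e.1 == 2 || e.1 == 1)) ys)
                    (fun e => e.1) false))) =
            (List.filter (fun e => e.1 == (4:Int)) ys ++
              (List.filter (fun e => e.1 == (3:Int)) ys ++
                (List.filter (fun e => e.1 == (2:Int)) ys ++ List.filter (fun e => e.1 == (1:Int)) ys))) ++
              PySem.List.sorted
                (List.filter (fun e => !(e.1 == (4:Int) || e.1 == 3 || e.1 == 2 || e.1 == 1)) ys)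
                (fun e => e.1) false
          by simp,
          pvInsertBy_append pvBefore x _ _
            (fun a ha => by
              refine pvBefore_rest_prio x a ⟨h4, h3, h2, h1⟩ ?_
              rcases List.mem_append.mp ha with ha | ha
              · exact Or.inl (hmem4 a ha)
              rcases List.mem_append.mp ha with ha | ha
              · exact Or.inr (Or.inl (hmem3 a ha))
              rcases List.mem_append.mp ha with ha | ha
              · exact Or.inr (Or.inr (Or.inl (hmem2 a ha)))
              · exact Or.inr (Or.inr (Or.inr (hmem1 a ha)))),
          pvInsertBy_congr pvBefore (fun a b => decide (a.1 < b.1)) x _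
            (fun y hy => pvBefore_rest_rest x y ⟨h4, h3, h2, h1⟩ (hmemR y hy))]
      have hins : PySem.List.insertBy (fun a b : Int × String => decide (a.1 < b.1)) x
          (PySem.List.sorted
            (List.filter (fun e => !(e.1 == (4:Int) || e.1 == 3 || e.1 == 2 || e.1 == 1)) ys)
            (fun e => e.1) false) =
          PySem.List.sorted
            ((List.filter (fun e => !(e.1 == (4:Int) || e.1 == 3 || e.1 == 2 || e.1 == 1)) ys) ++ [x])
            (fun e => e.1) false := by
        rw [PySem.List.sorted_eq_foldl_insertBy, PySem.List.sorted_eq_foldl_insertBy,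
          List.foldl_append]
        rfl
      rw [hins]
      simp [List.filter_append, h1, h2, h3, h4]

-- With distinct keys, every pair of the list looks itself up.
theorem pvGet_of_nodup (address : List (String × String))
    (h : (address.map (fun kv => kv.1)).Nodup) :
    ∀ p ∈ address, (PySem.Dict.mk address).get? p.1 = some p.2 := by
  induction address with
  | nil => intro p hp; simp at hp
  | cons kv rest ih =>
    intro p hp
    simp only [List.map_cons, List.nodup_cons] at h
    rcases List.mem_cons.mp hp with rfl | hp
    · rw [PySem.Dict.get?_mk_cons]
      simp
    · have hne : ¬ (kv.1 == p.1) = true := by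
        simp only [beq_iff_eq]
        intro hEq
        exact h.1 (hEq ▸ List.mem_map.mpr ⟨p, hp, rfl⟩)
      rw [PySem.Dict.get?_mk_cons, if_neg hne]
      exact ih h.2 p hp

-- The A-side loop (keys iterated, values looked up in d) equals the B-side loop
-- (pairs iterated) once every pair of the list looks itself up in d.
theorem pvFold_eq (d : List (String × String)) :
    ∀ (addr : List (String × String)),
      (∀ p ∈ addr, (PySem.Dict.mk d).get? p.1 = some p.2) →
      ∀ (acc : List (Int × String)),
      ((addr.map (fun kv => kv.1)).foldl (fun acc key =>
        if PySem.Str.startswith key "ISO3166-2-lvl" then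
          match PySem.Str.split? key "lvl" with
          | none => acc
          | some parts =>
            match PySem.List.pyGet? parts 1 with
            | none => acc
            | some part =>
              match PySem.Int.ofStr? part with
              | none => acc
              | some level =>
                match (PySem.Dict.mk d).get? key with
                | none => acc
                | some iso_code => acc ++ [(level, iso_code)]
        else acc) acc) =
      (addr.foldl (fun acc kv =>
        if PySem.Str.startswith kv.1 "ISO3166-2-lvl" then
          match PySem.Str.split? kv.1 "lvl" with
          | none => acc
          | some parts =>
            match PySem.List.pyGet? parts 1 with
            | none => acc
            | some part =>
              match PySem.Int.ofStr? part with
              | none => acc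
              | some lvl => acc ++ [(lvl, kv.2)]
        else acc) acc) := by
  intro addr
  induction addr with
  | nil => intro _ acc; rfl
  | cons kv rest ih =>
    intro h acc
    simp only [List.map_cons, List.foldl_cons]
    rw [h kv (List.mem_cons_self), ih (fun p hp => h p (List.mem_cons_of_mem kv hp))]

-- The two extraction loops produce the same entries list (distinct keys).
-- The two extraction loops produce the same entries list (distinct keys).
theorem pvEntries_eq (address : List (String × String))
    (h : (address.map (fun kv => kv.1)).Nodup) :
    ((address.map (fun kv => kv.1)).foldl (fun acc key =>
      if PySem.Str.startswith key "ISO3166-2-lvl" then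
        match PySem.Str.split? key "lvl" with
        | none => acc
        | some parts =>
          match PySem.List.pyGet? parts 1 with
          | none => acc
          | some part =>
            match PySem.Int.ofStr? part with
            | none => acc
            | some level =>
              match (PySem.Dict.mk address).get? key with
              | none => acc
              | some iso_code => acc ++ [(level, iso_code)]
      else acc) []) =
    (address.foldl (fun acc kv =>
      if PySem.Str.startswith kv.1 "ISO3166-2-lvl" then
        match PySem.Str.split? kv.1 "lvl" with
        | none => acc
        | some parts =>
          match PySem.List.pyGet? parts 1 with
          | none => acc
          | some part =>
            match PySem.Int.ofStr? part with
            | none => acc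
            | some lvl => acc ++ [(lvl, kv.2)]
      else acc) []) := by
  exact pvFold_eq address address (pvGet_of_nodup address h) []

-- ===== VERDICT (by name: the statement is the Claim_ definition above) =====
theorem get_iso_subdivisions_spec : Claim_equal_get_iso_subdivisions := by
  intro address _ hpre
  unfold Spec_get_iso_subdivisions get_iso_subdivisions get_iso_subdivisions_alt
  rw [pvEntries_eq address hpre, pvSorted_eq_assemble]
  rfl
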